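-- pv_equiv track=rewrite | github.com/mit3r/TemplateAiSD | Sprawozdanie nr4/utils.py | pretty_print_graph
-- ===== SOURCE A (Python) =====
-- def pretty_print_graph(edge_list):
--     from collections import defaultdict
--
--     adjacency_list = defaultdict(list)
--
--     for u, v in edge_list:
--         adjacency_list[u].append(v)
--         adjacency_list[v].append(u)  # Because the graph is undirected
--
--     result = []
--     for vertex in sorted(adjacency_list):
--         connections = ', '.join(map(str, sorted(adjacency_list[vertex])))
--         result.append(f"{vertex}: {connections}")
--
--     return "\n".join(result)
-- ===== SOURCE B (Python) =====
-- def pretty_print_graph(edge_list):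
--     # One flat pass: expand every edge into both directed pairs, sort once
--     # lexicographically, then sweep the sorted run grouping consecutive pairs
--     # that share the same source vertex.
--     pairs = []
--     for u, v in edge_list:
--         pairs.append((u, v))
--         pairs.append((v, u))
--     pairs.sort()
--     groups = []
--     for u, v in pairs:
--         if groups and groups[-1][0] == u:
--             groups[-1][1].append(v)
--         else:
--             groups.append((u, [v]))
--     return "\n".join(f"{u}: " + ", ".join(map(str, vs)) for u, vs in groups)
-- ===== Notes on version B (the rewrite author's own statement) =====
-- stated objective: alternative
-- what changed: Instead of building a defaultdict adjacency map and sorting each vertex's neighbour list separately, B expands every edge into its two directed pairs, sorts that flat list once lexicographically, and emits the lines by grouping consecutive pairs with equal source vertex in a single sweep.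
import Mathlib
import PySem

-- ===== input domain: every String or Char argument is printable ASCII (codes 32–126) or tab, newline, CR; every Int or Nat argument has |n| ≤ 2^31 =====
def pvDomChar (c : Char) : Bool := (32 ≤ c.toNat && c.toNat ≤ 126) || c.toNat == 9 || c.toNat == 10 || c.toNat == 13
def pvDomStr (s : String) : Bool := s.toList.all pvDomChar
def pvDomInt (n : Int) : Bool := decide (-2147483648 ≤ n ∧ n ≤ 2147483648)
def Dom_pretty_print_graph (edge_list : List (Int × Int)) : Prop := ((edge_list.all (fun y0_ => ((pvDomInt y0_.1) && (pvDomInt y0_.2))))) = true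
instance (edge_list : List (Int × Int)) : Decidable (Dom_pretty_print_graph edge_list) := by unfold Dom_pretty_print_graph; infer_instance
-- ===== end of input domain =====

-- B replaces A's defaultdict adjacency map (one sort per vertex) by expanding each edge
-- into both directed pairs, sorting the flat list once lexicographically and grouping
-- consecutive equal source vertices in one sweep (objective: alternative algorithm).

-- ===== PORT A =====
def pretty_print_graph (edge_list : List (Int × Int)) : String :=
  -- adjacency_list = defaultdict(list); for u, v in edge_list: adjacency_list[u].append(v); adjacency_list[v].append(u)
  let adjacency_list : PySem.Dict Int (List Int) :=
    edge_list.foldl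
      (fun d uv => (d.modify uv.1 [] (· ++ [uv.2])).modify uv.2 [] (· ++ [uv.1]))
      PySem.Dict.empty
  -- for vertex in sorted(adjacency_list): result.append(f"{vertex}: {connections}")
  let result : List String :=
    (PySem.List.sorted adjacency_list.keys (fun x => x) false).foldl
      (fun res vertex =>
        let connections := PySem.Str.join ", "
          ((PySem.List.sorted (adjacency_list.getD vertex []) (fun x => x) false).map PySem.Int.toStr)
        res ++ [PySem.Int.toStr vertex ++ ": " ++ connections])
      []
  PySem.Str.join "\n" result

-- ===== PORT B =====
-- the body of B's grouping sweep: 'if groups and groups[-1][0] == u: groups[-1][1].append(v) else: groups.append((u, [v]))'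
def pvGroupStep (groups : List (Int × List Int)) (p : Int × Int) : List (Int × List Int) :=
  match groups.getLast? with
  | some g => if g.1 = p.1 then groups.dropLast ++ [(g.1, g.2 ++ [p.2])] else groups ++ [(p.1, [p.2])]
  | none => groups ++ [(p.1, [p.2])]

def pretty_print_graph_alt (edge_list : List (Int × Int)) : String :=
  -- pairs = []; for u, v in edge_list: pairs.append((u, v)); pairs.append((v, u))
  let pairs : List (Int × Int) :=
    edge_list.foldl (fun acc uv => acc ++ [(uv.1, uv.2), (uv.2, uv.1)]) []
  -- pairs.sort()  (tuples compare lexicographically)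
  let spairs := PySem.List.sorted2 pairs (·.1) (·.2) false
  -- the grouping sweep
  let groups := spairs.foldl pvGroupStep []
  PySem.Str.join "\n"
    (groups.map (fun g => PySem.Int.toStr g.1 ++ ": " ++ PySem.Str.join ", " (g.2.map PySem.Int.toStr)))

-- ===== PRECONDITION & SPEC =====
def Spec_pretty_print_graph (edge_list : List (Int × Int)) (out : String) : Prop := out = pretty_print_graph_alt edge_list
instance (edge_list : List (Int × Int)) (out : String) : Decidable (Spec_pretty_print_graph edge_list out) := by unfold Spec_pretty_print_graph; infer_instance

-- ===== CLAIM (what is proved, stated in full; the proofs are below) =====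
def Claim_equal_pretty_print_graph : Prop := ∀ (edge_list : List (Int × Int)), Dom_pretty_print_graph edge_list → Spec_pretty_print_graph edge_list (pretty_print_graph edge_list)

-- ===== LEMMAS AND PROOFS =====

-- the flat directed-pair list both programs are really about
def pvPairs (edge_list : List (Int × Int)) : List (Int × Int) :=
  edge_list.flatMap (fun uv => [(uv.1, uv.2), (uv.2, uv.1)])

-- the sorted distinct source vertices
def pvVerts (Q : List (Int × Int)) : List Int :=
  PySem.List.sorted (PySem.Set.ofList (Q.map (·.1))) (fun x => x) false

-- the sorted neighbour list of v
def pvNbrs (Q : List (Int × Int)) (v : Int) : List Int :=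
  PySem.List.sorted ((Q.filter (fun p => p.1 == v)).map (·.2)) (fun x => x) false

-- A's double-modify loop over edges is the single-modify loop over the flat pair list
lemma pvAdj_eq_flat (edge_list : List (Int × Int)) (d : PySem.Dict Int (List Int)) :
    edge_list.foldl (fun d uv => (d.modify uv.1 [] (· ++ [uv.2])).modify uv.2 [] (· ++ [uv.1])) d
      = (pvPairs edge_list).foldl (fun d p => d.modify p.1 [] (· ++ [p.2])) d := by
  induction edge_list generalizing d with
  | nil => rfl
  | cons uv rest ih => simp [pvPairs, List.flatMap_cons, List.foldl] at ih ⊢; exact ih _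

-- Python's tuple sort is the sort by the lexicographic key
lemma pvSorted2_eq_sorted_toLex (Q : List (Int × Int)) :
    PySem.List.sorted2 Q (·.1) (·.2) false = PySem.List.sorted Q (fun p => toLex p) false := by
  unfold PySem.List.sorted2 PySem.List.sorted
  simp only [if_neg (by decide : ¬ (false = true))]
  congr 1
  funext acc x
  congr 1
  funext a b
  have h : (!decide (b.1 < a.1)) = decide (a.1 ≤ b.1) := by
    rw [Bool.eq_iff_iff]; simp
  rw [h, Bool.eq_iff_iff]
  simp only [Bool.or_eq_true, Bool.and_eq_true, decide_eq_true_eq, Prod.Lex.toLex_lt_toLex]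
  omega

-- sweep a whole run of pairs with the same source onto the last group
lemma pvGroupStep_run (ns : List Int) (v : Int) (acc : List (Int × List Int)) (g : List Int) :
    ((ns.map (fun w => (v, w))).foldl pvGroupStep (acc ++ [(v, g)])) = acc ++ [(v, g ++ ns)] := by
  induction ns generalizing g with
  | nil => simp
  | cons n ns ih =>
    have hstep : pvGroupStep (acc ++ [(v, g)]) (v, n) = acc ++ [(v, g ++ [n])] := by
      simp [pvGroupStep]
    simp only [List.map_cons, List.foldl_cons, hstep, ih]
    simp

-- the grouping sweep over a flattened group structure with strictly increasing sources
lemma pvGroup_flat (vs : List Int) (ns : Int → List Int)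
    (hs : vs.Pairwise (· < ·)) (hne : ∀ v ∈ vs, ns v ≠ [])
    (acc : List (Int × List Int))
    (hacc : ∀ g, acc.getLast? = some g → ∀ v ∈ vs, g.1 < v) :
    (vs.flatMap (fun v => (ns v).map (fun w => (v, w)))).foldl pvGroupStep acc
      = acc ++ vs.map (fun v => (v, ns v)) := by
  induction vs generalizing acc with
  | nil => simp
  | cons v vs ih =>
    obtain ⟨n0, nt, hn⟩ := List.exists_cons_of_ne_nil (hne v (by simp))
    have hstep : pvGroupStep acc (v, n0) = acc ++ [(v, [n0])] := by
      cases hlast : acc.getLast? with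
      | none => simp [pvGroupStep, hlast]
      | some g =>
        have := hacc g hlast v (by simp)
        simp only [pvGroupStep, hlast]
        rw [if_neg (by omega)]
    rw [List.flatMap_cons, List.foldl_append, hn]
    simp only [List.map_cons, List.foldl_cons, hstep]
    rw [show acc ++ [(v, [n0])] = (acc ++ []) ++ [(v, [n0])] by simp] at *
    rw [pvGroupStep_run]
    rw [ih (List.Pairwise.sublist (List.sublist_cons_self _ _) hs)
        (fun w hw => hne w (by simp [hw]))]
    · simp [hn]
    · intro g hg w hw
      simp only [List.append_nil] at hg
      rw [List.getLast?_concat] at hg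
      cases hg
      exact (List.pairwise_cons.mp hs).1 w hw

-- a nodup cover of the sources splits Q into its filter groups, up to permutation
lemma pvPerm_flatMap_filter (vs : List Int) (Q : List (Int × Int))
    (hnd : vs.Nodup) (hcov : ∀ p ∈ Q, p.1 ∈ vs) :
    (vs.flatMap (fun v => Q.filter (fun p => p.1 == v))).Perm Q := by
  induction vs generalizing Q with
  | nil =>
    have : Q = [] := by
      cases Q with
      | nil => rfl
      | cons p t => exact absurd (hcov p (by simp)) (by simp)
    simp [this]
  | cons v vs ih =>
    rcases List.nodup_cons.mp hnd with ⟨hv, hnd'⟩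
    rw [List.flatMap_cons]
    have hflat : vs.flatMap (fun w => Q.filter (fun p => p.1 == w))
        = vs.flatMap (fun w => (Q.filter (fun p => !(p.1 == v))).filter (fun p => p.1 == w)) := by
      apply List.flatMap_congr
      intro w hw
      rw [List.filter_filter]
      apply List.filter_congr
      intro p _
      by_cases h : p.1 = w
      · simp [h]; exact fun hh => hv (hh ▸ hw)
      · simp [h]
    rw [hflat]
    have hperm := ih (Q.filter (fun p => !(p.1 == v))) hnd' (by
      intro p hp
      rcases List.mem_filter.mp hp with ⟨hpQ, hne⟩
      have := hcov p hpQ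
      simp at hne
      simpa [hne] using this)
    exact (List.Perm.append_left _ hperm).trans (List.filter_append_perm _ Q)

-- each sorted neighbour group of v is, up to permutation, the v-filter of Q
lemma pvGroup_eq_filter (Q : List (Int × Int)) (v : Int) :
    ((pvNbrs Q v).map (fun w => (v, w))).Perm (Q.filter (fun p => p.1 == v)) := by
  have h1 : (pvNbrs Q v).Perm ((Q.filter (fun p => p.1 == v)).map (·.2)) :=
    PySem.List.sorted_perm _ _ _
  have h2 := h1.map (fun w => (v, w))
  have h3 : ((Q.filter (fun p => p.1 == v)).map (·.2)).map (fun w => (v, w))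
      = Q.filter (fun p => p.1 == v) := by
    rw [List.map_map]
    conv_rhs => rw [← List.map_id (Q.filter (fun p => p.1 == v))]
    apply List.map_congr_left
    intro p hp
    have := (List.mem_filter.mp hp).2
    simp at this
    simp [Function.comp, ← this]
  rw [h3] at h2
  exact h2

-- the grouped flattening is a permutation of Q
lemma pvS_perm (Q : List (Int × Int)) :
    ((pvVerts Q).flatMap (fun v => (pvNbrs Q v).map (fun w => (v, w)))).Perm Q := by
  have hnd : (pvVerts Q).Nodup :=
    ((PySem.List.sorted_perm _ _ _).nodup_iff).mpr (PySem.Set.nodup_ofList _)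
  have hstep : ((pvVerts Q).flatMap (fun v => (pvNbrs Q v).map (fun w => (v, w)))).Perm
      ((pvVerts Q).flatMap (fun v => Q.filter (fun p => p.1 == v))) :=
    List.Perm.flatMap_left _ (fun v _ => pvGroup_eq_filter Q v)
  refine hstep.trans (pvPerm_flatMap_filter _ _ hnd ?_)
  intro p hp
  rw [pvVerts, PySem.List.mem_sorted, PySem.Set.mem_ofList]
  exact List.mem_map_of_mem hp

-- the grouped flattening is lexicographically sorted
lemma pvS_pairwise (Q : List (Int × Int)) :
    ((pvVerts Q).flatMap (fun v => (pvNbrs Q v).map (fun w => (v, w)))).Pairwise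
      (fun a b => toLex a ≤ toLex b) := by
  rw [List.flatMap_def, List.pairwise_flatten]
  constructor
  · intro l hl
    rcases List.mem_map.mp hl with ⟨v, _, rfl⟩
    rw [List.pairwise_map]
    refine (PySem.List.sorted_pairwise _ (fun x => x)).imp ?_
    intro a b hab
    rw [Prod.Lex.toLex_le_toLex]
    exact Or.inr ⟨rfl, hab⟩
  · rw [List.pairwise_map]
    refine (PySem.List.sorted_ofList_pairwise_lt _).imp ?_
    intro v w hvw x hx y hy
    rcases List.mem_map.mp hx with ⟨a, _, rfl⟩
    rcases List.mem_map.mp hy with ⟨b, _, rfl⟩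
    rw [Prod.Lex.toLex_le_toLex]
    exact Or.inl hvw

-- the lexicographically sorted flat list IS the grouped flattening
lemma pvSorted_toLex_eq (Q : List (Int × Int)) :
    PySem.List.sorted Q (fun p => toLex p) false
      = (pvVerts Q).flatMap (fun v => (pvNbrs Q v).map (fun w => (v, w))) := by
  apply PySem.List.eq_of_perm_of_pairwise_le_of_injective (fun p : Int × Int => toLex p)
    (Equiv.injective toLex)
  · exact (PySem.List.sorted_perm _ _ _).trans (pvS_perm Q).symm
  · exact PySem.List.sorted_pairwise _ _
  · exact pvS_pairwise Q

-- core: B's grouping of the sorted flat list is A's per-vertex structure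
lemma pvCore (Q : List (Int × Int)) :
    (PySem.List.sorted2 Q (·.1) (·.2) false).foldl pvGroupStep []
      = (pvVerts Q).map (fun v => (v, pvNbrs Q v)) := by
  rw [pvSorted2_eq_sorted_toLex, pvSorted_toLex_eq]
  have h := pvGroup_flat (pvVerts Q) (pvNbrs Q)
    (PySem.List.sorted_ofList_pairwise_lt _)
    (fun v hv => by
      rw [pvVerts, PySem.List.mem_sorted, PySem.Set.mem_ofList] at hv
      rcases List.mem_map.mp hv with ⟨p, hp, rfl⟩
      rw [pvNbrs, Ne, PySem.List.sorted_eq_nil_iff]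
      simp only [List.map_eq_nil_iff, List.filter_eq_nil_iff]
      intro h
      exact absurd (by simp) (h p hp))
    [] (by simp)
  simpa using h

-- ===== VERDICT (by name: the statement is the Claim_ definition above) =====
theorem pretty_print_graph_spec : Claim_equal_pretty_print_graph := by
  intro edge_list _
  unfold Spec_pretty_print_graph pretty_print_graph pretty_print_graph_alt
  dsimp only []
  rw [pvAdj_eq_flat]
  rw [show edge_list.foldl (fun acc uv => acc ++ [(uv.1, uv.2), (uv.2, uv.1)]) []
        = pvPairs edge_list from by
    rw [PySem.List.foldl_append_eq_flatMap]; rfl]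
  rw [pvCore]
  rw [show ((pvPairs edge_list).foldl (fun d p => d.modify p.1 [] (· ++ [p.2]))
        PySem.Dict.empty).keys = PySem.Set.ofList ((pvPairs edge_list).map (·.1)) from by
    rw [PySem.Dict.keys_foldl_modify_key (pvPairs edge_list) (·.1) [] (fun _ p => (· ++ [p.2]))]
    simp [PySem.Set.update_nil_left]]
  rw [PySem.List.foldl_append_singleton_eq_map]
  rw [List.map_map, List.nil_append]
  congr 1
  apply List.map_congr_left
  intro v _
  simp only [Function.comp]
  rw [PySem.Dict.getD_foldl_modify_append]
  simp [pvNbrs]
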